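-- pv_equiv track=rewrite | github.com/Yael-Parra/OrientaTech | backend/services/cv_anonymizer.py | _filter_duplicate_names
-- ===== SOURCE A (Python) =====
-- from typing import List, Dict, Tuple, Optional, Any
--
-- def _filter_duplicate_names(names: List[str]) -> List[str]:
--     """Filtra nombres duplicados o contenidos en otros"""
--     sorted_names = sorted(names, key=len, reverse=True)
--     filtered = []
--
--     for name in sorted_names:
--         is_subset = any(name != filtered_name and name in filtered_name
--                       for filtered_name in filtered)
--         if not is_subset:
--             filtered.append(name)
--
--     return filtered
-- ===== SOURCE B (Python) =====
-- from typing import List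
--
-- def _filter_duplicate_names(names: List[str]) -> List[str]:
--     """Filtra nombres duplicados o contenidos en otros"""
--     return [n for n in sorted(names, key=len, reverse=True)
--             if not any(len(m) > len(n) and n in m for m in names)]
-- ===== Notes on version B (the rewrite author's own statement) =====
-- stated objective: simpler
-- what changed: A builds the result with a stateful loop testing each name against the already-kept names; B is a stateless comprehension keeping a name iff no strictly longer input name contains it (equivalent by transitivity of substring containment).
import Mathlib
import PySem

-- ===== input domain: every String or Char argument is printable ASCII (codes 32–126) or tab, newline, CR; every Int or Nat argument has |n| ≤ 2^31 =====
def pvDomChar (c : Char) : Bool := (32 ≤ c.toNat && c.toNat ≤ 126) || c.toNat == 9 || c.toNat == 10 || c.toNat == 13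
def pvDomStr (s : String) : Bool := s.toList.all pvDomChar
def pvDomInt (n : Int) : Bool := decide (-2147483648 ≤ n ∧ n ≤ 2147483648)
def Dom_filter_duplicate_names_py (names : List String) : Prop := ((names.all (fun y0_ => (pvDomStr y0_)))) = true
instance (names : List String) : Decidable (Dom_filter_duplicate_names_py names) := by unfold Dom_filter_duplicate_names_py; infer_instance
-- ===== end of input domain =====

-- B replaces A's stateful accumulator loop (membership tested against the already-kept names)
-- by a stateless comprehension testing proper-substring containment against the whole input
-- list; objective: simpler (the equivalence rests on transitivity of substring containment).


-- ===== PORT A =====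
def filter_duplicate_names_py (names : List String) : List String :=
  let sorted_names := PySem.List.sorted names (fun s => PySem.Str.len s) true
  sorted_names.foldl
    (fun filtered name =>
      if filtered.any (fun filtered_name =>
            decide (name ≠ filtered_name) && PySem.Str.isIn name filtered_name) then
        filtered
      else
        filtered ++ [name])
    []

-- ===== PORT B =====
-- the comprehension's condition: keep n iff no input name strictly longer than n contains n
def pvKeep (names : List String) (n : String) : Bool :=
  !(names.any (fun m => decide (PySem.Str.len n < PySem.Str.len m) && PySem.Str.isIn n m))

def filter_duplicate_names_py_alt (names : List String) : List String :=
  (PySem.List.sorted names (fun s => PySem.Str.len s) true).filter (pvKeep names)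

-- ===== PRECONDITION & SPEC =====
def Spec_filter_duplicate_names_py (names : List String) (out : List String) : Prop := out = filter_duplicate_names_py_alt names
instance (names : List String) (out : List String) : Decidable (Spec_filter_duplicate_names_py names out) := by unfold Spec_filter_duplicate_names_py; infer_instance

-- ===== CLAIM (what is proved, stated in full; the proofs are below) =====
def Claim_equal_filter_duplicate_names_py : Prop := ∀ (names : List String), Dom_filter_duplicate_names_py names → Spec_filter_duplicate_names_py names (filter_duplicate_names_py names)

-- ===== LEMMAS AND PROOFS =====

-- a proper substring (infix, unequal) is strictly shorter
lemma pv_proper_lt {x f : String} (hne : x ≠ f) (hin : x.toList <:+: f.toList) :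
    x.toList.length < f.toList.length := by
  rcases Nat.lt_or_ge x.toList.length f.toList.length with h | h
  · exact h
  · exact absurd (String.toList_inj.mp
      (List.IsInfix.eq_of_length hin (Nat.le_antisymm hin.length_le h))) hne

-- membership in B's test set, spelled out
lemma pv_keep_false_iff (names : List String) (n : String) :
    pvKeep names n = false ↔
      ∃ m ∈ names, n.toList.length < m.toList.length ∧ n.toList <:+: m.toList := by
  simp only [pvKeep, Bool.not_eq_false', List.any_eq_true, Bool.and_eq_true,
    decide_eq_true_eq, PySem.Str.isIn_iff_infix, PySem.Str.len_eq, Nat.cast_lt]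

lemma pv_keep_true_iff (names : List String) (n : String) :
    pvKeep names n = true ↔
      ∀ m ∈ names, n.toList.length < m.toList.length → ¬ n.toList <:+: m.toList := by
  rw [← Bool.not_eq_false, not_iff_comm, pv_keep_false_iff]
  push Not
  tauto

-- A's test against the kept names agrees with B's test against the whole input list,
-- provided the processed prefix p consists of input names and contains every input name
-- strictly longer than x (true when p ++ (x :: t) is the length-descending sorted input).
lemma pv_test_eq (names p : List String) (x : String)
    (hp : ∀ m ∈ names, x.toList.length < m.toList.length → m ∈ p)
    (hsub : ∀ m ∈ p, m ∈ names) :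
    ((p.filter (pvKeep names)).any (fun f =>
        decide (x ≠ f) && PySem.Str.isIn x f))
      = !(pvKeep names x) := by
  rw [Bool.eq_iff_iff, Bool.not_eq_true', pv_keep_false_iff]
  simp only [List.any_eq_true, List.mem_filter, Bool.and_eq_true, decide_eq_true_eq,
    PySem.Str.isIn_iff_infix]
  constructor
  · rintro ⟨f, ⟨hfp, _⟩, hne, hin⟩
    exact ⟨f, hsub f hfp, pv_proper_lt hne hin, hin⟩
  · rintro ⟨m, hmn, hlt, hin⟩
    -- choose a containing name of maximal length: it passes B's test itself
    have hmL : m ∈ names.filter (fun m => decide (x.toList.length < m.toList.length)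
        && PySem.Str.isIn x m) := by
      simp only [List.mem_filter, Bool.and_eq_true, decide_eq_true_eq,
        PySem.Str.isIn_iff_infix]
      exact ⟨hmn, hlt, hin⟩
    obtain ⟨g, hg⟩ : ∃ g, g ∈ (names.filter (fun m => decide (x.toList.length < m.toList.length)
        && PySem.Str.isIn x m)).argmax (fun s => s.toList.length) := by
      cases h : (names.filter (fun m => decide (x.toList.length < m.toList.length)
          && PySem.Str.isIn x m)).argmax (fun s => s.toList.length) with
      | none => exact absurd (List.argmax_eq_none.mp h) (List.ne_nil_of_mem hmL)
      | some g => exact ⟨g, by simp⟩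
    obtain ⟨hgn, hglt, hgin⟩ : g ∈ names ∧ x.toList.length < g.toList.length
        ∧ x.toList <:+: g.toList := by
      have := List.argmax_mem hg
      simp only [List.mem_filter, Bool.and_eq_true, decide_eq_true_eq,
        PySem.Str.isIn_iff_infix] at this
      exact ⟨this.1, this.2.1, this.2.2⟩
    refine ⟨g, ⟨hp g hgn hglt, ?_⟩, ?_, hgin⟩
    · -- g itself is kept by B: by maximality nothing strictly longer contains g
      rw [pv_keep_true_iff]
      intro m' hm' hlen hsubg
      have hm'L : m' ∈ names.filter (fun m => decide (x.toList.length < m.toList.length)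
          && PySem.Str.isIn x m) := by
        simp only [List.mem_filter, Bool.and_eq_true, decide_eq_true_eq,
          PySem.Str.isIn_iff_infix]
        exact ⟨hm', Nat.lt_trans hglt hlen, List.IsInfix.trans hgin hsubg⟩
      exact absurd (List.le_of_mem_argmax hm'L hg) (Nat.not_le_of_lt hlen)
    · intro hxg
      rw [hxg] at hglt
      omega

-- the length-descending sorted list: everything in the suffix after x is no longer than x
lemma pv_sorted_split (names p t : List String) (x : String)
    (h : p ++ x :: t = PySem.List.sorted names (fun s => PySem.Str.len s) true) :
    ∀ m ∈ names, x.toList.length < m.toList.length → m ∈ p := by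
  intro m hmn hlt
  have hperm : (p ++ x :: t).Perm names := h ▸ PySem.List.sorted_perm names _ true
  have hm : m ∈ p ++ x :: t := hperm.mem_iff.mpr hmn
  have hpw : (p ++ x :: t).Pairwise
      (fun a b => PySem.Str.len b ≤ PySem.Str.len a) :=
    h ▸ PySem.List.sorted_pairwise_rev names (fun s => PySem.Str.len s)
  rcases List.mem_append.mp hm with hmp | hmxt
  · exact hmp
  · exfalso
    rcases List.mem_cons.mp hmxt with rfl | hmt
    · omega
    · have hR : PySem.Str.len m ≤ PySem.Str.len x :=
        (List.rel_of_pairwise_cons ((List.pairwise_append.mp hpw).2.1)) hmt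
      simp only [PySem.Str.len_eq, Nat.cast_le] at hR
      omega

-- main loop invariant: folding A's step over the remaining suffix t, starting from the
-- B-filtered processed prefix p, yields the B-filter of p ++ t
lemma pv_loop (names : List String) :
    ∀ (t p : List String), p ++ t = PySem.List.sorted names (fun s => PySem.Str.len s) true →
      t.foldl (fun filtered name =>
          if filtered.any (fun filtered_name =>
              decide (name ≠ filtered_name) && PySem.Str.isIn name filtered_name) then
            filtered
          else filtered ++ [name]) (p.filter (pvKeep names))
        = (p ++ t).filter (pvKeep names) := by
  intro t
  induction t with
  | nil => intro p _; simp
  | cons x t ih =>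
    intro p hpt
    have hsub : ∀ m ∈ p, m ∈ names := by
      intro m hm
      have hperm : (p ++ x :: t).Perm names := hpt ▸ PySem.List.sorted_perm names _ true
      exact hperm.mem_iff.mp (List.mem_append_left _ hm)
    have hstep := pv_test_eq names p x (pv_sorted_split names p t x hpt) hsub
    have : (p ++ x :: t).filter (pvKeep names) = ((p ++ [x]) ++ t).filter (pvKeep names) := by
      simp
    rw [this, ← ih (p ++ [x]) (by simpa using hpt)]
    simp only [List.foldl_cons, hstep]
    cases hk : pvKeep names x with
    | false => simp [List.filter_append, hk]
    | true => simp [List.filter_append, hk]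

-- ===== VERDICT (by name: the statement is the Claim_ definition above) =====
theorem filter_duplicate_names_py_spec : Claim_equal_filter_duplicate_names_py := by
  intro names _
  unfold Spec_filter_duplicate_names_py filter_duplicate_names_py filter_duplicate_names_py_alt
  simpa using pv_loop names (PySem.List.sorted names (fun s => PySem.Str.len s) true) [] rfl
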